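-- pv_equiv track=rewrite | github.com/suryaatm21/job-tracker | .github/scripts/telegram_utils.py | safe_join_lines
-- ===== SOURCE A (Python) =====
-- from typing import List, Tuple, Optional
--
-- def safe_join_lines(header: str, lines: List[str], max_chars: int = 3900) -> List[str]:
--     """
--     Join lines into batches that fit within character limit, preserving whole lines.
--
--     Args:
--         header: Header text for first batch
--         lines: List of content lines to batch
--         max_chars: Maximum characters per batch
--
--     Returns:
--         list[str]: List of message batches ready to send
--     """
--     if not lines:
--         return [header] if header else []
--
--     batches = []
--     current_batch = []
--     current_length = len(header)
--
--     for line in lines: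
--         line_length = len(line) + 1  # +1 for newline
--
--         # If adding this line would exceed limit, start new batch
--         if current_batch and current_length + line_length > max_chars:
--             # Finish current batch
--             if batches:
--                 # Continuation batch
--                 batch_text = "(cont.)\n\n" + "\n".join(current_batch)
--             else:
--                 # First batch with header
--                 batch_text = header + "\n\n" + "\n".join(current_batch)
--
--             batches.append(batch_text)
--
--             # Start new batch
--             current_batch = [line]
--             current_length = 10 + line_length  # 10 for "(cont.)\n\n"
--         else:
--             # Add line to current batch
--             current_batch.append(line)
--             current_length += line_length
--
--     # Add final batch if there's content
--     if current_batch: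
--         if batches:
--             # Final continuation batch
--             batch_text = "(cont.)\n\n" + "\n".join(current_batch)
--         else:
--             # Single batch with header
--             batch_text = header + "\n\n" + "\n".join(current_batch)
--
--         batches.append(batch_text)
--
--     return batches
-- ===== SOURCE B (Python) =====
-- def safe_join_lines(header, lines, max_chars=3900):
--     """Prefix-sum + binary-search chunking: precompute cumulative lengths once,
--     then jump straight to each batch's cut point with a binary search."""
--     if not lines:
--         return [header] if header else []
--     n = len(lines)
--     cum = [0] * (n + 1)
--     for i in range(n):
--         cum[i + 1] = cum[i] + len(lines[i]) + 1
--     batches = []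
--     s = 0
--     base = len(header)
--     while s < n:
--         limit = max_chars - base + cum[s]
--         lo, hi = s + 1, n
--         while lo < hi:
--             mid = (lo + hi + 1) // 2
--             if cum[mid] <= limit:
--                 lo = mid
--             else:
--                 hi = mid - 1
--         prefix = header + "\n\n" if s == 0 else "(cont.)\n\n"
--         batches.append(prefix + "\n".join(lines[s:lo]))
--         s = lo
--         base = 10
--     return batches
-- ===== Notes on version B (the rewrite author's own statement) =====
-- stated objective: alternative
-- what changed: Replaces A's single line-by-line accumulate-and-flush loop by a prefix-sum array of line lengths built once, with each batch boundary found by a hand-written binary search over the prefix sums and each batch rendered from a list slice; no running batch or running length is maintained.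
import Mathlib
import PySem

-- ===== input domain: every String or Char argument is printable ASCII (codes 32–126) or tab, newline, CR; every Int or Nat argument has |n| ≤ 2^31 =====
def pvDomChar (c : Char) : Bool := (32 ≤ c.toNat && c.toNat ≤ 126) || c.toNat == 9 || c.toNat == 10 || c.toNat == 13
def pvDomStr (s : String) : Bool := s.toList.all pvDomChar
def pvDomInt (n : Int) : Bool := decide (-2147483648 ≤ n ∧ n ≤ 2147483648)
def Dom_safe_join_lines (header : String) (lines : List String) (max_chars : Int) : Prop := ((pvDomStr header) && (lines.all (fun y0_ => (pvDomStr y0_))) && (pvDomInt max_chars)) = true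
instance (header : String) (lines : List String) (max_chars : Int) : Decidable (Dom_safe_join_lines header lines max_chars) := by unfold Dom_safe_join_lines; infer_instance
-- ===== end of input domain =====

-- B replaces A's accumulate-and-flush loop by a prefix-sum array of line lengths plus a binary
-- search for each batch's cut point, rendering batches from list slices (objective: alternative).

-- ===== PORT A =====
-- loop body of A's single for-loop (state: batches, current_batch, current_length)
def sjlStepA (header : String) (max_chars : Int)
    (s : List String × List String × Int) (line : String) :
    List String × List String × Int :=
  let batches := s.1
  let current_batch := s.2.1
  let current_length := s.2.2
  let line_length : Int := PySem.Str.len line + 1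
  if current_batch ≠ [] ∧ current_length + line_length > max_chars then
    let batch_text :=
      if batches ≠ [] then "(cont.)\n\n" ++ PySem.Str.join "\n" current_batch
      else (header ++ "\n\n") ++ PySem.Str.join "\n" current_batch
    (batches ++ [batch_text], [line], 10 + line_length)
  else
    (batches, current_batch ++ [line], current_length + line_length)

-- A's trailing 'if current_batch:' block
def sjlFinA (header : String) (s : List String × List String × Int) : List String :=
  if s.2.1 ≠ [] then
    s.1 ++ [if s.1 ≠ [] then "(cont.)\n\n" ++ PySem.Str.join "\n" s.2.1
            else (header ++ "\n\n") ++ PySem.Str.join "\n" s.2.1]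
  else s.1

def safe_join_lines (header : String) (lines : List String) (max_chars : Int) : List String :=
  if lines = [] then (if header ≠ "" then [header] else [])
  else
    sjlFinA header (lines.foldl (sjlStepA header max_chars) ([], [], PySem.Str.len header))

-- ===== PORT B =====
-- the prefix-sum fill loop 'cum[i+1] = cum[i] + len(lines[i]) + 1', carrying the running value t = cum[i]
def sjlCumGo (t : Int) : List String → List Int
  | [] => [t]
  | l :: ls => t :: sjlCumGo (t + (PySem.Str.len l + 1)) ls

-- the inner 'while lo < hi' binary search of Source B; all indices are nonnegative, so Nat
-- arithmetic ((lo+hi+1)//2, cum[mid]) matches Python's exactly here; the loop is ported with a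
-- structural fuel argument (hi - lo at entry, an upper bound on its iteration count)
def sjlBS (cum : List Int) (limit : Int) : Nat → Nat → Nat → Nat
  | 0, lo, _ => lo
  | fuel + 1, lo, hi =>
    if lo < hi then
      let mid := (lo + hi + 1) / 2
      if cum.getD mid 0 ≤ limit then sjlBS cum limit fuel mid hi
      else sjlBS cum limit fuel lo (mid - 1)
    else lo

-- Source B's outer 'while s < n' loop (state: batches, s, base), again with a structural fuel
-- (n - s at entry: s strictly increases every iteration)
def sjlOuter (header : String) (max_chars : Int) (lines : List String) (cum : List Int) :
    Nat → List String → Nat → Int → List String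
  | 0, batches, _, _ => batches
  | fuel + 1, batches, s, base =>
    if s < lines.length then
      let limit := max_chars - base + cum.getD s 0
      let e := sjlBS cum limit (lines.length - (s + 1)) (s + 1) lines.length
      let pre := if s = 0 then header ++ "\n\n" else "(cont.)\n\n"
      sjlOuter header max_chars lines cum fuel
        (batches ++ [pre ++ PySem.Str.join "\n" (PySem.List.slice lines (some (s : Int)) (some (e : Int)))])
        e 10
    else batches

def safe_join_lines_alt (header : String) (lines : List String) (max_chars : Int) : List String :=
  if lines = [] then (if header ≠ "" then [header] else [])
  else sjlOuter header max_chars lines (sjlCumGo 0 lines) lines.length [] 0 (PySem.Str.len header)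

-- ===== PRECONDITION & SPEC =====
def Spec_safe_join_lines (header : String) (lines : List String) (max_chars : Int) (out : List String) : Prop := out = safe_join_lines_alt header lines max_chars
instance (header : String) (lines : List String) (max_chars : Int) (out : List String) : Decidable (Spec_safe_join_lines header lines max_chars out) := by unfold Spec_safe_join_lines; infer_instance

-- ===== CLAIM (what is proved, stated in full; the proofs are below) =====
def Claim_equal_safe_join_lines : Prop := ∀ (header : String) (lines : List String) (max_chars : Int), Dom_safe_join_lines header lines max_chars → Spec_safe_join_lines header lines max_chars (safe_join_lines header lines max_chars)

-- ===== LEMMAS AND PROOFS =====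

-- the greedy grouping both programs realise: A line by line, B chunk by chunk
def sjlGroups (m : Int) : List String → Int → List String → List (List String)
  | cur, _, [] => [cur]
  | cur, len, l :: t =>
    if cur ≠ [] ∧ len + (PySem.Str.len l + 1) > m then
      cur :: sjlGroups m [l] (10 + (PySem.Str.len l + 1)) t
    else
      sjlGroups m (cur ++ [l]) (len + (PySem.Str.len l + 1)) t

-- continuation rendering
def sjlRendC (gs : List (List String)) : List String :=
  gs.map (fun g => "(cont.)\n\n" ++ PySem.Str.join "\n" g)

-- full rendering: first group with the header, the rest as continuations
def sjlRend (header : String) (gs : List (List String)) : List String :=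
  match gs with
  | [] => []
  | g :: t => ((header ++ "\n\n") ++ PySem.Str.join "\n" g) :: sjlRendC t

theorem sjlRend_append (h : String) (gs : List (List String)) (c : List String) :
    sjlRend h (gs ++ [c]) =
      sjlRend h gs ++ [if gs = [] then (h ++ "\n\n") ++ PySem.Str.join "\n" c
                       else "(cont.)\n\n" ++ PySem.Str.join "\n" c] := by
  cases gs <;> simp [sjlRend, sjlRendC]

-- A's fold equals the grouping followed by rendering
theorem sjl_foldA (h : String) (m : Int) :
    ∀ (ls : List String) (gs : List (List String)) (cur : List String) (len : Int),
      cur ≠ [] →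
      sjlFinA h (ls.foldl (sjlStepA h m) (sjlRend h gs, cur, len)) =
        sjlRend h (gs ++ sjlGroups m cur len ls) := by
  intro ls
  induction ls with
  | nil =>
    intro gs cur len hcur
    rw [List.foldl_nil, sjlGroups, sjlRend_append]
    simp only [sjlFinA, hcur, ne_eq]
    cases gs <;> simp [sjlRend]
  | cons l ls ih =>
    intro gs cur len hcur
    rw [List.foldl_cons]
    show sjlFinA h (ls.foldl (sjlStepA h m) (sjlStepA h m (sjlRend h gs, cur, len) l)) = _
    by_cases hc : cur ≠ [] ∧ len + (PySem.Str.len l + 1) > m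
    · have hA : sjlStepA h m (sjlRend h gs, cur, len) l =
          (sjlRend h (gs ++ [cur]), [l], 10 + (PySem.Str.len l + 1)) := by
        simp only [sjlStepA]
        rw [if_pos hc, sjlRend_append]
        congr 2
        cases gs <;> simp [sjlRend]
      rw [hA, sjlGroups, if_pos hc, ih (gs ++ [cur]) [l] _ (by simp)]
      simp
    · have hA : sjlStepA h m (sjlRend h gs, cur, len) l =
          (sjlRend h gs, cur ++ [l], len + (PySem.Str.len l + 1)) := by
        simp only [sjlStepA]
        rw [if_neg hc]
      rw [hA, sjlGroups, if_neg hc]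
      exact ih gs (cur ++ [l]) _ (by simp)

-- prefix sums of line lengths (the mathematical contents of Source B's cum array)
def sjlCumF (lines : List String) (k : Nat) : Int :=
  ((lines.take k).map (fun l => PySem.Str.len l + 1)).sum

theorem sjlCumF_succ (lines : List String) (k : Nat) (h : k < lines.length) :
    sjlCumF lines (k + 1) = sjlCumF lines k + (PySem.Str.len lines[k] + 1) := by
  unfold sjlCumF
  rw [List.take_succ, List.map_append, List.sum_append, List.getElem?_eq_getElem h]
  simp

theorem sjl_len_nonneg (s : String) : 0 ≤ PySem.Str.len s := by
  simp [PySem.Str.len_eq]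

theorem sjlCumF_mono (lines : List String) :
    ∀ j i, i ≤ j → j ≤ lines.length → sjlCumF lines i ≤ sjlCumF lines j := by
  intro j
  induction j with
  | zero => intro i h _; interval_cases i; rfl
  | succ j ih =>
    intro i hij hj
    by_cases hi : i = j + 1
    · subst hi; rfl
    · have h1 := ih i (by omega) (by omega)
      have h2 := sjlCumF_succ lines j (by omega)
      have h3 := sjl_len_nonneg lines[j]
      omega

theorem sjlCumGo_getD :
    ∀ (ls : List String) (t : Int) (k : Nat), k ≤ ls.length →
      (sjlCumGo t ls).getD k 0 = t + sjlCumF ls k := by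
  intro ls
  induction ls with
  | nil =>
    intro t k hk
    simp only [List.length_nil, Nat.le_zero] at hk
    subst hk
    simp [sjlCumGo, sjlCumF]
  | cons l ls ih =>
    intro t k hk
    cases k with
    | zero => simp [sjlCumGo, sjlCumF]
    | succ k =>
      have := ih (t + (PySem.Str.len l + 1)) k (by simpa using hk)
      simp only [sjlCumGo, List.getD_cons_succ]
      rw [this]
      simp only [sjlCumF, List.take_succ_cons, List.map_cons, List.sum_cons]
      ring

-- the binary search never moves below lo
theorem sjlBS_lo_le (cum : List Int) (limit : Int) :
    ∀ fuel lo hi, lo ≤ sjlBS cum limit fuel lo hi := by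
  intro fuel
  induction fuel with
  | zero => intro lo hi; simp [sjlBS]
  | succ fuel ih =>
    intro lo hi
    rw [sjlBS]
    by_cases hlt : lo < hi
    · simp only [hlt, if_true]
      by_cases hc : cum.getD ((lo + hi + 1) / 2) 0 ≤ limit
      · simp only [hc, if_true]
        have := ih ((lo + hi + 1) / 2) hi
        omega
      · simp only [hc, if_false]
        exact ih lo ((lo + hi + 1) / 2 - 1)
    · simp [hlt]

-- what the binary search computes (fuel sufficient): the largest admissible index, or lo if none
theorem sjlBS_spec (cum : List Int) (limit : Int) :
    ∀ fuel lo hi, hi - lo ≤ fuel → lo ≤ hi →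
      (∀ i j, i ≤ j → j ≤ hi → cum.getD i 0 ≤ cum.getD j 0) →
      sjlBS cum limit fuel lo hi ≤ hi ∧
      (cum.getD (sjlBS cum limit fuel lo hi) 0 ≤ limit ∨ sjlBS cum limit fuel lo hi = lo) ∧
      (∀ k, sjlBS cum limit fuel lo hi < k → k ≤ hi → ¬ (cum.getD k 0 ≤ limit)) := by
  intro fuel
  induction fuel with
  | zero =>
    intro lo hi hd hle _
    simp only [sjlBS]
    exact ⟨hle, Or.inr trivial, by omega⟩
  | succ fuel ih =>
    intro lo hi hd hle hmono
    rw [sjlBS]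
    by_cases hlt : lo < hi
    · simp only [hlt, if_true]
      set mid := (lo + hi + 1) / 2 with hmid
      have hmid1 : lo + 1 ≤ mid := by omega
      have hmid2 : mid ≤ hi := by omega
      by_cases hc : cum.getD mid 0 ≤ limit
      · simp only [hc, if_true]
        obtain ⟨h1, h2, h3⟩ := ih mid hi (by omega) (by omega) hmono
        refine ⟨h1, ?_, h3⟩
        rcases h2 with h2 | h2
        · exact Or.inl h2
        · rw [h2]; exact Or.inl hc
      · simp only [hc, if_false]
        obtain ⟨h1, h2, h3⟩ := ih lo (mid - 1) (by omega) (by omega)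
          (fun i j hij hj => hmono i j hij (by omega))
        refine ⟨by omega, h2, ?_⟩
        intro k hk1 hk2
        by_cases hkm : k ≤ mid - 1
        · exact h3 k hk1 hkm
        · intro habs
          exact hc (le_trans (hmono mid k (by omega) hk2) habs)
    · simp only [hlt, if_false]
      exact ⟨by omega, Or.inr trivial, by omega⟩

-- a finished outer loop (s past the end) returns its accumulator for any fuel
theorem sjlOuter_stop (header : String) (m : Int) (lines : List String) (cum : List Int)
    (fuel : Nat) (batches : List String) (s : Nat) (base : Int) (h : ¬ s < lines.length) :
    sjlOuter header m lines cum fuel batches s base = batches := by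
  cases fuel with
  | zero => rfl
  | succ fuel => rw [sjlOuter]; simp [h]

-- the slice of lines forming one batch
def sjlSlice (lines : List String) (s k : Nat) : List String :=
  (lines.drop s).take (k - s)

theorem sjlSlice_single (lines : List String) (s : Nat) (h : s < lines.length) :
    sjlSlice lines s (s + 1) = [lines[s]] := by
  unfold sjlSlice
  have h1 : s + 1 - s = 1 := by omega
  rw [h1, List.drop_eq_getElem_cons h]
  rfl

theorem sjlSlice_snoc (lines : List String) (s k : Nat) (hs : s ≤ k) (h : k < lines.length) :
    sjlSlice lines s k ++ [lines[k]] = sjlSlice lines s (k + 1) := by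
  unfold sjlSlice
  have hk : k + 1 - s = (k - s) + 1 := by omega
  rw [hk, List.take_succ]
  have : (lines.drop s)[k - s]? = some lines[k] := by
    rw [List.getElem?_drop]
    rw [List.getElem?_eq_getElem (by omega)]
    congr 1
    congr 1
    omega
  rw [this]
  rfl

theorem sjlSlice_ne_nil (lines : List String) (s k : Nat) (hs : s < k) (h : k ≤ lines.length) :
    sjlSlice lines s k ≠ [] := by
  unfold sjlSlice
  intro habs
  have := congrArg List.length habs
  simp only [List.length_take, List.length_drop, List.length_nil] at this
  omega

-- one batch of the grouping: the greedy group starting at s with running base 'base' is lines[s:e]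
theorem sjl_split (lines : List String) (m base : Int) (s e : Nat)
    (hse : s < e) (hen : e ≤ lines.length)
    (hAcc : ∀ j, s + 1 < j → j ≤ e → base + (sjlCumF lines j - sjlCumF lines s) ≤ m)
    (hStop : ∀ (h : e < lines.length), ¬ (base + (sjlCumF lines (e + 1) - sjlCumF lines s) ≤ m)) :
    ∀ d k, s < k → k ≤ e → e - k ≤ d →
      sjlGroups m (sjlSlice lines s k) (base + (sjlCumF lines k - sjlCumF lines s)) (lines.drop k)
        = sjlSlice lines s e ::
          (if h : e < lines.length then
            sjlGroups m [lines[e]] (10 + (PySem.Str.len lines[e] + 1)) (lines.drop (e + 1))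
           else []) := by
  intro d
  induction d with
  | zero =>
    intro k hk1 hk2 hd
    have hke : e = k := by omega
    subst hke
    by_cases hlt : e < lines.length
    · rw [List.drop_eq_getElem_cons hlt, sjlGroups]
      have hcond : sjlSlice lines s e ≠ [] ∧
          base + (sjlCumF lines e - sjlCumF lines s) + (PySem.Str.len lines[e] + 1) > m := by
        constructor
        · exact sjlSlice_ne_nil lines s e hk1 hen
        · have := hStop hlt
          have h2 := sjlCumF_succ lines e hlt
          omega
      rw [if_pos hcond]
      simp [hlt]
    · have : lines.length ≤ e := by omega
      have hdrop : lines.drop e = [] := List.drop_eq_nil_of_le this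
      rw [hdrop, sjlGroups]
      simp [hlt]
  | succ d ih =>
    intro k hk1 hk2 hd
    by_cases hke : k = e
    · exact ih k hk1 hk2 (by omega)
    · have hkl : k < lines.length := by omega
      rw [List.drop_eq_getElem_cons hkl, sjlGroups]
      have hcond : ¬ (sjlSlice lines s k ≠ [] ∧
          base + (sjlCumF lines k - sjlCumF lines s) + (PySem.Str.len lines[k] + 1) > m) := by
        intro ⟨_, habs⟩
        have h2 := sjlCumF_succ lines k hkl
        have := hAcc (k + 1) (by omega) (by omega)
        omega
      rw [if_neg hcond, sjlSlice_snoc lines s k (by omega) hkl]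
      have h2 := sjlCumF_succ lines k hkl
      have harg : base + (sjlCumF lines k - sjlCumF lines s) + (PySem.Str.len lines[k] + 1)
          = base + (sjlCumF lines (k + 1) - sjlCumF lines s) := by omega
      rw [harg]
      exact ih (k + 1) (by omega) (by omega) (by omega)

-- the outer loop of B renders exactly the greedy grouping of the remaining lines
theorem sjl_outer (header : String) (m : Int) (lines : List String) :
    ∀ fuel s base batches (hs : s < lines.length), lines.length - s ≤ fuel →
      sjlOuter header m lines (sjlCumGo 0 lines) fuel batches s base =
        batches ++
          (if s = 0 then
            sjlRend header (sjlGroups m [lines[s]] (base + (PySem.Str.len lines[s] + 1)) (lines.drop (s + 1)))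
           else
            sjlRendC (sjlGroups m [lines[s]] (base + (PySem.Str.len lines[s] + 1)) (lines.drop (s + 1)))) := by
  intro d
  induction d with
  | zero => intro s base batches hs hd; omega
  | succ d ih =>
    intro s base batches hs hd
    have hcum : ∀ k, k ≤ lines.length → (sjlCumGo 0 lines).getD k 0 = sjlCumF lines k := by
      intro k hk
      simpa using sjlCumGo_getD lines 0 k hk
    have hmono : ∀ i j, i ≤ j → j ≤ lines.length →
        (sjlCumGo 0 lines).getD i 0 ≤ (sjlCumGo 0 lines).getD j 0 := by
      intro i j hij hj
      rw [hcum i (by omega), hcum j hj]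
      exact sjlCumF_mono lines j i hij hj
    set limit := m - base + (sjlCumGo 0 lines).getD s 0 with hlimit
    set e := sjlBS (sjlCumGo 0 lines) limit (lines.length - (s + 1)) (s + 1) lines.length with he
    obtain ⟨hle, hadm, hno⟩ := sjlBS_spec (sjlCumGo 0 lines) limit (lines.length - (s + 1))
      (s + 1) lines.length (le_refl _) (by omega) hmono
    have hlo := sjlBS_lo_le (sjlCumGo 0 lines) limit (lines.length - (s + 1))
      (s + 1) lines.length
    rw [← he] at hle hadm hno hlo
    have hAcc : ∀ j, s + 1 < j → j ≤ e → base + (sjlCumF lines j - sjlCumF lines s) ≤ m := by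
      intro j h1 h2
      rcases hadm with hP | hEq
      · rw [hcum e hle, hlimit, hcum s (by omega)] at hP
        have := sjlCumF_mono lines e j h2 hle
        omega
      · omega
    have hStop : ∀ (_ : e < lines.length), ¬ (base + (sjlCumF lines (e + 1) - sjlCumF lines s) ≤ m) := by
      intro h habs
      refine hno (e + 1) (by omega) (by omega) ?_
      rw [hcum (e + 1) (by omega), hlimit, hcum s (by omega)]
      omega
    have hsplit := sjl_split lines m base s e (by omega) hle hAcc hStop (e - (s + 1))
      (s + 1) (by omega) (by omega) (le_refl _)
    rw [sjlSlice_single lines s hs] at hsplit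
    have hbase : base + (sjlCumF lines (s + 1) - sjlCumF lines s)
        = base + (PySem.Str.len lines[s] + 1) := by
      have := sjlCumF_succ lines s hs
      omega
    rw [hbase] at hsplit
    have hslice : PySem.List.slice lines (some (s : Int)) (some (e : Int)) = sjlSlice lines s e := by
      rw [PySem.List.slice_natCast]
      rfl
    rw [sjlOuter]
    simp only [hs, if_pos, ← hlimit, ← he, hslice, hsplit]
    by_cases hcase : e < lines.length
    · rw [ih e 10 _ hcase (by omega)]
      have he0 : ¬ e = 0 := by omega
      simp only [hcase, dif_pos, he0, if_false]
      by_cases hs0 : s = 0 <;>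
        simp [hs0, sjlRend, sjlRendC]
    · rw [sjlOuter_stop header m lines (sjlCumGo 0 lines) d _ e 10 hcase]
      simp only [hcase, dif_neg, not_false_iff] at hsplit ⊢
      by_cases hs0 : s = 0 <;>
        simp [hs0, sjlRend, sjlRendC]

-- ===== VERDICT (by name: the statement is the Claim_ definition above) =====
theorem safe_join_lines_spec : Claim_equal_safe_join_lines := by
  intro header lines max_chars _
  unfold Spec_safe_join_lines safe_join_lines safe_join_lines_alt
  cases lines with
  | nil => simp
  | cons l ls =>
    simp only [reduceCtorEq, if_false]
    rw [List.foldl_cons]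
    have hA : sjlStepA header max_chars ([], [], PySem.Str.len header) l =
        (sjlRend header [], [l], PySem.Str.len header + (PySem.Str.len l + 1)) := by
      simp [sjlStepA, sjlRend]
    rw [hA, sjl_foldA header max_chars ls [] [l] _ (by simp)]
    rw [sjl_outer header max_chars (l :: ls) ((l :: ls).length) 0 (PySem.Str.len header) []
        (by simp) (by simp)]
    simp
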